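-- pv_equiv track=rewrite | github.com/T-Python-Feb-24/LAB_FUNCTIONS | bouns.py | generate_descending_pattern
-- ===== SOURCE A (Python) =====
-- def generate_descending_pattern(num: int) -> str:
--     if num <= 0:
--         return "Please enter a positive number."
--
--     pattern = ""
--     for i in range(num, 0, -1):
--         line = ' '.join(str(j) for j in range(i, 0, -1))
--         pattern += line + "\n"
--
--     return pattern.rstrip()
-- ===== SOURCE B (Python) =====
-- def generate_descending_pattern(num: int) -> str:
--     if num <= 0:
--         return "Please enter a positive number."
--     tokens = [str(j) for j in range(num, 0, -1)]
--     return '\n'.join(' '.join(tokens[k:]) for k in range(num))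
-- ===== Notes on version B (the rewrite author's own statement) =====
-- stated objective: simpler
-- what changed: B builds the descending number-string table once and forms each line as a join of a suffix slice of that table, joining the lines with a single '\n'.join, instead of regenerating a range and its str() conversions per line, accumulating with += and stripping a trailing newline with rstrip.
import Mathlib
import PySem

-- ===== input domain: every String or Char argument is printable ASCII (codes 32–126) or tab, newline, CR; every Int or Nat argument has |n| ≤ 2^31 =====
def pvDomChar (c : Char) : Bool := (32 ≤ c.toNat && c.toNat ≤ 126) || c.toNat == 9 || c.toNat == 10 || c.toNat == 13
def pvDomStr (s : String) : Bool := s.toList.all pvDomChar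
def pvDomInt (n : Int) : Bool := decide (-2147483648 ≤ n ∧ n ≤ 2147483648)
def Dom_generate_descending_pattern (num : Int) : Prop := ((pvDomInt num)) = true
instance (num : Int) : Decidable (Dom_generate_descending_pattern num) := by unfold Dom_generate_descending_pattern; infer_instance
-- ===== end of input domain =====

-- B builds the token table once and joins suffix slices of it (no rstrip); A regenerates each line's range.

-- ===== PORT A =====
def generate_descending_pattern (num : Int) : String :=
  if num ≤ 0 then "Please enter a positive number."
  else
    let pattern := (PySem.List.pyRange num 0 (-1)).foldl
      (fun pattern i =>
        pattern ++ PySem.Str.join " " ((PySem.List.pyRange i 0 (-1)).map PySem.Int.toStr) ++ "\n") ""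
    PySem.Str.rstrip pattern

-- ===== PORT B =====
def generate_descending_pattern_alt (num : Int) : String :=
  if num ≤ 0 then "Please enter a positive number."
  else
    let tokens := (PySem.List.pyRange num 0 (-1)).map PySem.Int.toStr
    PySem.Str.join "\n" ((PySem.List.pyRange 0 num 1).map
      (fun k => PySem.Str.join " " (PySem.List.slice tokens (some k) none)))

-- ===== PRECONDITION & SPEC =====
def Spec_generate_descending_pattern (num : Int) (out : String) : Prop := out = generate_descending_pattern_alt num
instance (num : Int) (out : String) : Decidable (Spec_generate_descending_pattern num out) := by unfold Spec_generate_descending_pattern; infer_instance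

-- ===== CLAIM (what is proved, stated in full; the proofs are below) =====
def Claim_equal_generate_descending_pattern : Prop := ∀ (num : Int), Dom_generate_descending_pattern num → Spec_generate_descending_pattern num (generate_descending_pattern num)

-- ===== LEMMAS AND PROOFS =====

-- the characters of the line printed for counter value i
def pvLine (i : Int) : List Char :=
  (PySem.Str.join " " ((PySem.List.pyRange i 0 (-1)).map PySem.Int.toStr)).toList

theorem pv_fold (l : List Int) : ∀ acc : String,
    (l.foldl (fun p i =>
        p ++ PySem.Str.join " " ((PySem.List.pyRange i 0 (-1)).map PySem.Int.toStr) ++ "\n") acc).toList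
      = acc.toList ++ (l.map (fun i => pvLine i ++ ['\n'])).flatten := by
  induction l with
  | nil => intro acc; simp
  | cons i t ih =>
    intro acc
    simp only [List.foldl_cons, ih, List.map_cons, List.flatten_cons]
    simp [pvLine]

theorem pv_flatten (l : List Int) (h : l ≠ []) :
    (l.map (fun i => pvLine i ++ ['\n'])).flatten
      = PySem.Chars.join ['\n'] (l.map pvLine) ++ ['\n'] := by
  induction l with
  | nil => exact absurd rfl h
  | cons a t ih =>
    cases t with
    | nil => simp [PySem.Chars.join_singleton]
    | cons b t' =>
      have ih' := ih (by simp)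
      rw [List.map_cons, List.flatten_cons, ih']
      simp only [List.map_cons, PySem.Chars.join_cons_cons]
      simp [List.append_assoc]

theorem pv_ends (n : Nat) :
    ∃ ds, PySem.Chars.join ['\n'] ((PySem.List.pyRange ((n : Int) + 1) 0 (-1)).map pvLine) = ds ++ ['1'] := by
  induction n with
  | zero =>
    refine ⟨[], ?_⟩
    decide
  | succ m ih =>
    have e1 : ((↑(m + 1) : Int) + 1) - 1 = (m : Int) + 1 := by push_cast [Nat.cast_add]; omega
    have e2 : ((m : Int) + 1) - 1 = (m : Int) := by omega
    have hc1 : PySem.List.pyRange ((↑(m + 1) : Int) + 1) 0 (-1)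
        = ((↑(m + 1) : Int) + 1) :: PySem.List.pyRange ((m : Int) + 1) 0 (-1) := by
      rw [PySem.List.pyRange_neg_one_cons (by push_cast; omega), e1]
    have hc2 : PySem.List.pyRange ((m : Int) + 1) 0 (-1)
        = ((m : Int) + 1) :: PySem.List.pyRange (m : Int) 0 (-1) := by
      rw [PySem.List.pyRange_neg_one_cons (by omega), e2]
    obtain ⟨ds, hds⟩ := ih
    rw [hc1, hc2, List.map_cons, List.map_cons, PySem.Chars.join_cons_cons,
        ← List.map_cons, ← hc2, hds]
    exact ⟨pvLine ((↑(m + 1) : Int) + 1) ++ ['\n'] ++ ds, by simp⟩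

theorem pv_rstrip (ds : List Char) :
    PySem.Chars.rstrip ((ds ++ ['1']) ++ ['\n']) = ds ++ ['1'] := by
  have h1 : PySem.Chars.isspace '\n' = true := by decide
  have h2 : PySem.Chars.isspace '1' = false := by decide
  simp [PySem.Chars.rstrip, List.dropWhile, h1, h2]

theorem pv_drop (k : Nat) : ∀ a : Int, (k : Int) ≤ a →
    (PySem.List.pyRange a 0 (-1)).drop k = PySem.List.pyRange (a - k) 0 (-1) := by
  induction k with
  | zero => intro a _; simp
  | succ m ih =>
    intro a h
    rw [PySem.List.pyRange_neg_one_cons (by push_cast at h ⊢; omega), List.drop_succ_cons,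
        ih (a - 1) (by push_cast at h ⊢; omega), show a - 1 - (m : Int) = a - (↑(m + 1) : Int) from by push_cast; omega]

theorem pv_blines (n : Nat) :
    ((PySem.List.pyRange 0 ((n : Int)) 1).map
        (fun k => (PySem.Str.join " "
          (PySem.List.slice ((PySem.List.pyRange (n : Int) 0 (-1)).map PySem.Int.toStr) (some k) none)).toList))
      = (PySem.List.pyRange (n : Int) 0 (-1)).map pvLine := by
  have hsub : ((n : Int) - 0).toNat = n := by omega
  rw [PySem.List.pyRange_zero_natCast n, List.map_map]
  conv_rhs => rw [PySem.List.pyRange_neg_one (n : Int) 0, hsub, List.map_map]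
  apply List.map_congr_left
  intro k hk
  have hk' : k < n := List.mem_range.mp hk
  simp only [Function.comp_apply]
  rw [PySem.List.slice_from _ (Int.natCast_nonneg k), Int.toNat_natCast,
      ← List.map_drop, pv_drop k (n : Int) (by omega)]
  rfl

-- ===== VERDICT (by name: the statement is the Claim_ definition above) =====
theorem generate_descending_pattern_spec : Claim_equal_generate_descending_pattern := by
  intro num _
  unfold Spec_generate_descending_pattern
  by_cases h : num ≤ 0
  · simp [generate_descending_pattern, generate_descending_pattern_alt, h]
  · obtain ⟨m, rfl⟩ : ∃ m : Nat, num = (m : Int) + 1 := ⟨(num - 1).toNat, by omega⟩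
    refine String.toList_inj.mp ?_
    have hpos : ¬ ((m : Int) + 1 ≤ 0) := by omega
    have hne : PySem.List.pyRange ((m : Int) + 1) 0 (-1) ≠ [] := by
      rw [PySem.List.pyRange_neg_one_cons (by omega)]
      simp
    obtain ⟨ds, hds⟩ := pv_ends m
    simp only [generate_descending_pattern, generate_descending_pattern_alt, if_neg hpos]
    have hnl : "\n".toList = ['\n'] := by decide
    have hb := pv_blines (m + 1)
    push_cast at hb
    rw [PySem.Str.toList_rstrip, pv_fold, pv_flatten _ hne, hds, PySem.Str.toList_join,
        List.map_map, hnl]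
    simp only [Function.comp_def]
    rw [hb, hds]
    simpa using pv_rstrip ds
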